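-- pv_equiv track=rewrite | github.com/hammondkd/CVtools | CVtools2/utilities.py | yearlist2string
-- ===== SOURCE A (Python) =====
-- def yearlist2string (numlist) : # {{{1
--     ''' Converts a list of years to a string. Example:
-- >> list2string([2018,2018,2018,2016,2015,2015])
-- "3*[2018] + [2016] + 2*[2015]"
-- '''
--     if numlist is None :
--         return None
--     try :
--         current = numlist[0]
--     except IndexError :
--         return ''
--     n = 0
--     smartlist = ''
--     for year in numlist :
--         if year == current :
--             n += 1
--             continue
--         else :
--             smartlist += str(n) + '*[' + str(current) + '] + '
--             current = year
--             n = 1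
--     smartlist += str(n) + '*[' + str(current) + ']'
--     return smartlist
-- ===== SOURCE B (Python) =====
-- def yearlist2string(numlist):
--     if numlist is None:
--         return None
--     parts = []
--     i = 0
--     while i < len(numlist):
--         j = i + 1
--         while j < len(numlist) and numlist[j] == numlist[i]:
--             j += 1
--         parts.append(str(j - i) + '*[' + str(numlist[i]) + ']')
--         i = j
--     return ' + '.join(parts)
-- ===== Notes on version B (the rewrite author's own statement) =====
-- stated objective: simpler
-- what changed: B splits the list into maximal runs (scan to the end of each run, then continue from there), collects one formatted string per run, and joins them with ' + ', replacing A's running current/count state and manually appended trailing piece.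
import Mathlib
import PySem

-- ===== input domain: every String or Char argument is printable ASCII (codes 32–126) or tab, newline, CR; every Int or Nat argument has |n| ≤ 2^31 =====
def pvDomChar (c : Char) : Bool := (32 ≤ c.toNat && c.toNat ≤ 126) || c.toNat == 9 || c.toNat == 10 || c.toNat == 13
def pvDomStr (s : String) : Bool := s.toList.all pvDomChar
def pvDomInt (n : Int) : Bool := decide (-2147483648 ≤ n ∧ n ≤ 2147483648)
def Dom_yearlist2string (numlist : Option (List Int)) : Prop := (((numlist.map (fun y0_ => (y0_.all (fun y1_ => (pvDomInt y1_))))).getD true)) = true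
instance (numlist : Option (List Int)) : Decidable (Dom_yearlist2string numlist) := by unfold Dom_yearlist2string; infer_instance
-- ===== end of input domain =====

-- B splits the list into maximal runs and joins the formatted runs with ' + ' (simpler decomposition);
-- A keeps a running current/count state and appends a trailing piece after the loop. Return values only.

-- ===== PORT A =====
-- strings are built on List Char (PySem.Chars side) and wrapped with String.ofList at the end
def yearlist2string (numlist : Option (List Int)) : Option String :=
  match numlist with
  | none => none
  | some xs =>
    match xs with
    | [] => some ""          -- numlist[0] raises IndexError → return ''
    | x0 :: _ =>
      let st := xs.foldl (fun (st : Int × Int × List Char) year =>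
        if year == st.1 then (st.1, st.2.1 + 1, st.2.2)
        else (year, 1,
          st.2.2 ++ PySem.Int.toChars st.2.1 ++ "*[".toList ++ PySem.Int.toChars st.1 ++ "] + ".toList))
        (x0, 0, [])
      some (String.ofList (st.2.2 ++ PySem.Int.toChars st.2.1 ++ "*[".toList ++ PySem.Int.toChars st.1 ++ "]".toList))

-- ===== PORT B =====
-- B's outer while (advance i to j) is the recursion over the remaining suffix; the inner while
-- scanning to the end of the current run is takeWhile/dropWhile on the tail
def pvRunsB : List Int → List (List Char)
  | [] => []
  | x :: xs =>
    (PySem.Int.toChars (((xs.takeWhile (fun y => y == x)).length : Int) + 1)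
       ++ "*[".toList ++ PySem.Int.toChars x ++ "]".toList)
      :: pvRunsB (xs.dropWhile (fun y => y == x))
termination_by xs => xs.length
decreasing_by
  simp only [List.length_cons, Nat.lt_succ_iff]
  exact List.length_dropWhile_le _ _

def yearlist2string_alt (numlist : Option (List Int)) : Option String :=
  match numlist with
  | none => none
  | some xs => some (String.ofList (PySem.Chars.join " + ".toList (pvRunsB xs)))

-- ===== PRECONDITION & SPEC =====
def Spec_yearlist2string (numlist : Option (List Int)) (out : Option String) : Prop := out = yearlist2string_alt numlist
instance (numlist : Option (List Int)) (out : Option String) : Decidable (Spec_yearlist2string numlist out) := by unfold Spec_yearlist2string; infer_instance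

-- ===== CLAIM (what is proved, stated in full; the proofs are below) =====
def Claim_equal_yearlist2string : Prop := ∀ (numlist : Option (List Int)), Dom_yearlist2string numlist → Spec_yearlist2string numlist (yearlist2string numlist)

-- ===== LEMMAS AND PROOFS =====

-- one formatted run
def pvItem (n c : Int) : List Char :=
  PySem.Int.toChars n ++ "*[".toList ++ PySem.Int.toChars c ++ "]".toList

-- what follows the current run in the final string
def pvTail (rest : List Int) : List Char :=
  match rest with
  | [] => []
  | _ :: _ => " + ".toList ++ PySem.Chars.join " + ".toList (pvRunsB rest)

lemma pvJoin_runs (x : Int) (xs : List Int) :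
    PySem.Chars.join " + ".toList (pvRunsB (x :: xs)) =
      pvItem (((xs.takeWhile (fun y => y == x)).length : Int) + 1) x
        ++ pvTail (xs.dropWhile (fun y => y == x)) := by
  rw [pvRunsB]
  cases h : xs.dropWhile (fun y => y == x) with
  | nil => simp [pvRunsB, pvItem, pvTail, PySem.Chars.join_singleton]
  | cons r rs =>
    rw [pvTail]
    rw [pvRunsB]
    rw [PySem.Chars.join_cons_cons]
    simp [pvItem]

-- loop invariant for A's fold: the trailing append distributes over the remaining runs
lemma pvFoldA (ys : List Int) : ∀ (c n : Int) (s : List Char),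
    (let st := ys.foldl (fun (st : Int × Int × List Char) year =>
        if year == st.1 then (st.1, st.2.1 + 1, st.2.2)
        else (year, 1,
          st.2.2 ++ PySem.Int.toChars st.2.1 ++ "*[".toList ++ PySem.Int.toChars st.1 ++ "] + ".toList))
        (c, n, s)
     st.2.2 ++ PySem.Int.toChars st.2.1 ++ "*[".toList ++ PySem.Int.toChars st.1 ++ "]".toList)
    = s ++ pvItem (n + ((ys.takeWhile (fun y => y == c)).length : Int)) c
        ++ pvTail (ys.dropWhile (fun y => y == c)) := by
  induction ys with
  | nil => intro c n s; simp [pvItem, pvTail]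
  | cons y ys ih =>
    intro c n s
    by_cases hy : y = c
    · subst hy
      simp only [List.foldl_cons, beq_self_eq_true, if_pos, List.takeWhile_cons,
        List.dropWhile_cons]
      rw [ih]
      have harg : (n + 1) + ((ys.takeWhile (fun z => z == y)).length : Int)
          = n + (((ys.takeWhile (fun z => z == y)).length : Int) + 1) := by ring
      simp [harg]
    · have hp : ¬ ((fun z => z == c) y = true) := by simp [hy]
      rw [List.foldl_cons, if_neg (by simp [hy]),
        List.takeWhile_cons_of_neg (p := fun z => z == c) (l := ys) hp,
        List.dropWhile_cons_of_neg (p := fun z => z == c) (l := ys) hp]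
      rw [ih]
      rw [pvTail, pvJoin_runs]
      have harg : (1 : Int) + ((ys.takeWhile (fun z => z == y)).length : Int)
          = ((ys.takeWhile (fun z => z == y)).length : Int) + 1 := by ring
      simp [harg, pvItem]

theorem yearlist2string_spec : Claim_equal_yearlist2string := by
  unfold Claim_equal_yearlist2string Spec_yearlist2string
  intro numlist _
  cases numlist with
  | none => rfl
  | some xs =>
    cases xs with
    | nil =>
      show yearlist2string (some []) = yearlist2string_alt (some [])
      simp [yearlist2string, yearlist2string_alt, pvRunsB, PySem.Chars.join_nil]
    | cons x t =>
      show yearlist2string (some (x :: t)) = yearlist2string_alt (some (x :: t))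
      simp only [yearlist2string, yearlist2string_alt]
      rw [List.foldl_cons, if_pos (by simp)]
      have h01 : (0 : Int) + 1 = 1 := by ring
      rw [h01]
      rw [pvJoin_runs]
      have hfold := pvFoldA t x 1 []
      simp only at hfold
      rw [hfold]
      have harg : (1 : Int) + ((t.takeWhile (fun y => y == x)).length : Int)
          = ((t.takeWhile (fun y => y == x)).length : Int) + 1 := by ring
      simp [harg]
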